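-- pv_equiv track=rewrite | github.com/juanazorzolo/TP2-PDI-TUIA-Herrera-Oviedo-Zorzolo | Ej2.py | seleccionar_cajas_cercanas
-- ===== SOURCE A (Python) =====
-- def seleccionar_cajas_cercanas(bboxes):
--     valid_boxes = []
--
--     for i, (x1, y1, w1, h1) in enumerate(bboxes):
--         centro1 = (x1 + w1 // 2, y1 + h1 // 2)  # Centro de la bounding box actual
--         is_valid = False  # Identificador de bounding box válida
--
--         # Comparar bounding box actual con todas las demás
--         for j, (x2, y2, w2, h2) in enumerate(bboxes):
--             if i != j:
--                 centro2 = (x2 + w2 // 2, y2 + h2 // 2)  # Centro de la bounding box comparada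
--
--                 # Calcular las distancias horizontal y vertical entre los centros
--                 dist_x = abs(centro1[0] - centro2[0])
--                 diff_y = abs(centro1[1] - centro2[1])
--
--                 # Filtrar bounding box válida
--                 if dist_x <= 15 and diff_y <= 10:
--                     is_valid = True
--                     break
--         if is_valid:
--             valid_boxes.append((x1, y1, w1, h1))
--
--     # Devolver la lista de bounding boxes válidas
--     return valid_boxes
-- ===== SOURCE B (Python) =====
-- def _bisect_left(xs, t):
--     # standard bisect_left loop (first index with xs[idx] >= t)
--     lo, hi = 0, len(xs)
--     while lo < hi:
--         mid = (lo + hi) // 2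
--         if xs[mid] < t:
--             lo = mid + 1
--         else:
--             hi = mid
--     return lo
--
--
-- def _count_near(cs, xs, c):
--     # number of centers within the rectangle |dx|<=15, |dy|<=10 around c
--     lo = _bisect_left(xs, c[0] - 15)
--     hi = _bisect_left(xs, c[0] + 16)
--     cnt = 0
--     for k in range(lo, hi):
--         if abs(cs[k][1] - c[1]) <= 10:
--             cnt += 1
--     return cnt
--
--
-- def seleccionar_cajas_cercanas(bboxes):
--     # A box is valid iff some OTHER box's center is near its center; since every
--     # center is near itself, that is: at least 2 centers in its window.
--     centers = [(x + w // 2, y + h // 2) for (x, y, w, h) in bboxes]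
--     cs = sorted(centers, key=lambda c: c[0])
--     xs = [c[0] for c in cs]
--     out = []
--     for (x, y, w, h), c in zip(bboxes, centers):
--         if _count_near(cs, xs, c) >= 2:
--             out.append((x, y, w, h))
--     return out
-- ===== Notes on version B (the rewrite author's own statement) =====
-- stated objective: faster
-- what changed: Replaces the all-pairs scan (for each box, search all others for a near center) by precomputing centers, sorting them by x, and deciding validity per box with a binary-search x-window count, using the fact that 'some other center is near' equals 'at least 2 centers (including its own) are in the window'.
import Mathlib
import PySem

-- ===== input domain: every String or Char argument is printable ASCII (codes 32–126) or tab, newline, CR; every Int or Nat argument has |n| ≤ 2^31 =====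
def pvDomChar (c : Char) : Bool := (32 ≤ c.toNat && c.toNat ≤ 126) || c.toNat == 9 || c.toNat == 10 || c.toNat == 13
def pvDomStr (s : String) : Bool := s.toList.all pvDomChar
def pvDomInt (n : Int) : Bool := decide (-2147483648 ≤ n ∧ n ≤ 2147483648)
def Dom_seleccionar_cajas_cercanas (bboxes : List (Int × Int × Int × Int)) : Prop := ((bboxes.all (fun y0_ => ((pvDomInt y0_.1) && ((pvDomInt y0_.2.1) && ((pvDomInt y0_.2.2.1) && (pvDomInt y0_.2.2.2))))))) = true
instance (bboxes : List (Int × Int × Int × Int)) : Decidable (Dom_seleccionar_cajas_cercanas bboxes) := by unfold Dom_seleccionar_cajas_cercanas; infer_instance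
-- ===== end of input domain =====

-- B replaces A's O(n^2) all-pairs near-center search by sort + binary-search window counting
-- (a center is always near itself, so 'some other center near' = 'window count >= 2'); objective: faster.

-- ===== PORT A =====
-- center of a bbox: (x + w // 2, y + h // 2)
def pvCenter (b : Int × Int × Int × Int) : Int × Int :=
  (b.1 + PySem.Int.floordiv b.2.2.1 2, b.2.1 + PySem.Int.floordiv b.2.2.2 2)

-- |dx| <= 15 and |dy| <= 10 between two centers
def pvNear (c1 c2 : Int × Int) : Bool :=
  decide (|c1.1 - c2.1| ≤ 15) && decide (|c1.2 - c2.2| ≤ 10)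

-- A's inner loop: scan all (j, box) pairs, break as soon as a near one with j != i is found
def pvAInner (c1 : Int × Int) (i : Int) : List (Int × (Int × Int × Int × Int)) → Bool
  | [] => false
  | (j, b2) :: tl =>
    if i ≠ j then
      (if pvNear c1 (pvCenter b2) then true else pvAInner c1 i tl)
    else pvAInner c1 i tl

-- A's outer loop over enumerate(bboxes), appending the valid boxes in order
def pvAOuter (bboxes : List (Int × Int × Int × Int)) : List (Int × (Int × Int × Int × Int)) → List (Int × Int × Int × Int)
  | [] => []
  | (i, b) :: tl =>
    if pvAInner (pvCenter b) i (PySem.List.enumerate bboxes 0) then b :: pvAOuter bboxes tl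
    else pvAOuter bboxes tl

def seleccionar_cajas_cercanas (bboxes : List (Int × Int × Int × Int)) : List (Int × Int × Int × Int) :=
  pvAOuter bboxes (PySem.List.enumerate bboxes 0)

-- ===== PORT B =====
-- Source B's _bisect_left is the standard bisect_left loop, ported as PySem.List.bisectLeft.
-- Source B's _count_near: count centers in the x-window [c.1-15, c.1+15] with |dy| <= 10.
-- cs[k] is always in range here (bisect bounds), so getD is exact for Python's cs[k].
def pvCountNear (cs : List (Int × Int)) (xs : List Int) (c : Int × Int) : Nat :=
  let lo := PySem.List.bisectLeft xs (c.1 - 15)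
  let hi := PySem.List.bisectLeft xs (c.1 + 16)
  (List.range' lo (hi - lo)).foldl
    (fun cnt k => if |(cs.getD k (0, 0)).2 - c.2| ≤ 10 then cnt + 1 else cnt) 0

-- B's output loop over zip(bboxes, centers)
def pvBLoop (cs : List (Int × Int)) (xs : List Int) : List ((Int × Int × Int × Int) × (Int × Int)) → List (Int × Int × Int × Int)
  | [] => []
  | (b, c) :: tl =>
    if 2 ≤ pvCountNear cs xs c then b :: pvBLoop cs xs tl else pvBLoop cs xs tl

def seleccionar_cajas_cercanas_alt (bboxes : List (Int × Int × Int × Int)) : List (Int × Int × Int × Int) :=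
  let centers := bboxes.map pvCenter
  let cs := PySem.List.sorted centers (fun c => c.1) false
  let xs := cs.map (fun c => c.1)
  pvBLoop cs xs (bboxes.zip centers)

-- ===== PRECONDITION & SPEC =====
def Spec_seleccionar_cajas_cercanas (bboxes : List (Int × Int × Int × Int)) (out : List (Int × Int × Int × Int)) : Prop := out = seleccionar_cajas_cercanas_alt bboxes
instance (bboxes : List (Int × Int × Int × Int)) (out : List (Int × Int × Int × Int)) : Decidable (Spec_seleccionar_cajas_cercanas bboxes out) := by unfold Spec_seleccionar_cajas_cercanas; infer_instance

-- ===== CLAIM (what is proved, stated in full; the proofs are below) =====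
def Claim_equal_seleccionar_cajas_cercanas : Prop := ∀ (bboxes : List (Int × Int × Int × Int)), Dom_seleccionar_cajas_cercanas bboxes → Spec_seleccionar_cajas_cercanas bboxes (seleccionar_cajas_cercanas bboxes)

-- ===== LEMMAS AND PROOFS =====

-- A's inner break-scan is List.any
theorem pvAInner_eq_any (c : Int × Int) (i : Int) (l : List (Int × (Int × Int × Int × Int))) :
    pvAInner c i l = l.any (fun p => decide (i ≠ p.1) && pvNear c (pvCenter p.2)) := by
  induction l with
  | nil => rfl
  | cons hd tl ih =>
    obtain ⟨j, b2⟩ := hd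
    by_cases hij : i ≠ j <;> by_cases hn : pvNear c (pvCenter b2) = true <;>
      simp [pvAInner, hij, hn, ih]

-- counting foldl is countP
theorem foldl_count (p : Nat → Bool) (l : List Nat) (a : Nat) :
    l.foldl (fun cnt k => if p k then cnt + 1 else cnt) a = a + l.countP p := by
  induction l generalizing a with
  | nil => simp
  | cons hd tl ih =>
    by_cases h : p hd = true <;> simp [List.countP_cons, h, ih] <;> omega

-- countP through indices
theorem countP_eq_range {α : Type} (l : List α) (p : α → Bool) (d : α) :
    l.countP p = (List.range l.length).countP (fun k => p (l.getD k d)) := by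
  induction l with
  | nil => simp
  | cons hd tl ih =>
    simp [List.range_succ_eq_map, List.countP_cons, List.countP_map, Function.comp_def, ih]
    try omega

theorem pvNear_refl (c : Int × Int) : pvNear c c = true := by
  simp [pvNear]

-- the binary-search window count equals the full near-count over the sorted list
theorem count_window (cs : List (Int × Int)) (c : Int × Int)
    (hs : (cs.map (fun x => x.1)).Pairwise (· ≤ ·)) :
    pvCountNear cs (cs.map (fun x => x.1)) c = cs.countP (fun c2 => pvNear c c2) := by
  set xs := cs.map (fun x => x.1) with hxs
  have hlen : xs.length = cs.length := by simp [hxs]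
  obtain ⟨hlo_le, hlo_lt, hlo_ge⟩ := PySem.List.bisectLeft_spec xs (c.1 - 15) hs
  obtain ⟨hhi_le, hhi_lt, hhi_ge⟩ := PySem.List.bisectLeft_spec xs (c.1 + 16) hs
  set lo := PySem.List.bisectLeft xs (c.1 - 15) with hlodef
  set hi := PySem.List.bisectLeft xs (c.1 + 16) with hhidef
  have hxsk : ∀ (k : Nat) (hk : k < xs.length), xs[k] = (cs.getD k (0,0)).1 := by
    intro k hk
    have hk' : k < cs.length := by omega
    rw [List.getD_eq_getElem _ _ hk']
    simp [hxs]
  have hlohi : lo ≤ hi := by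
    by_contra h
    have hhilt : hi < xs.length := by omega
    have h1 := hlo_lt hi hhilt (by omega)
    have h2 := hhi_ge hi hhilt (le_refl hi)
    omega
  have hcnt : pvCountNear cs xs c =
      (List.range' lo (hi - lo)).countP (fun k => decide (|(cs.getD k (0,0)).2 - c.2| ≤ 10)) := by
    simp only [pvCountNear, ← hlodef, ← hhidef]
    rw [show (fun (cnt : Nat) (k : Nat) => if |(cs.getD k (0,0)).2 - c.2| ≤ 10 then cnt + 1 else cnt)
        = (fun cnt k => if (decide (|(cs.getD k (0,0)).2 - c.2| ≤ 10)) = true then cnt + 1 else cnt) by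
      funext cnt k; simp]
    rw [foldl_count]
    omega
  rw [hcnt, countP_eq_range cs _ (0,0), List.range_eq_range']
  have hsplit : List.range' 0 cs.length =
      List.range' 0 lo ++ List.range' lo (hi - lo) ++ List.range' hi (cs.length - hi) := by
    have e1 : List.range' 0 lo 1 ++ List.range' (0 + 1 * lo) (hi - lo) 1 = List.range' 0 (lo + (hi - lo)) 1 :=
      List.range'_append
    have e2 : List.range' 0 hi 1 ++ List.range' (0 + 1 * hi) (cs.length - hi) 1 =
        List.range' 0 (hi + (cs.length - hi)) 1 := List.range'_append
    simp only [Nat.zero_add, Nat.one_mul] at e1 e2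
    rw [show lo + (hi - lo) = hi by omega] at e1
    rw [show hi + (cs.length - hi) = cs.length by omega] at e2
    rw [← e2, ← e1]
  rw [hsplit, List.countP_append, List.countP_append]
  have hleft : (List.range' 0 lo).countP (fun k => pvNear c (cs.getD k (0,0))) = 0 := by
    rw [List.countP_eq_zero]
    intro k hk
    rw [List.mem_range'_1] at hk
    have hk' : k < xs.length := by omega
    have hlt := hlo_lt k hk' (by omega)
    rw [hxsk k hk'] at hlt
    simp only [pvNear, Bool.and_eq_true, decide_eq_true_eq, not_and]
    intro h
    exfalso
    rw [abs_le] at h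
    omega
  have hright : (List.range' hi (cs.length - hi)).countP (fun k => pvNear c (cs.getD k (0,0))) = 0 := by
    rw [List.countP_eq_zero]
    intro k hk
    rw [List.mem_range'_1] at hk
    have hk' : k < xs.length := by omega
    have hge := hhi_ge k hk' (by omega)
    rw [hxsk k hk'] at hge
    simp only [pvNear, Bool.and_eq_true, decide_eq_true_eq, not_and]
    intro h
    exfalso
    rw [abs_le] at h
    omega
  have hmid : (List.range' lo (hi - lo)).countP (fun k => pvNear c (cs.getD k (0,0))) =
      (List.range' lo (hi - lo)).countP (fun k => decide (|(cs.getD k (0,0)).2 - c.2| ≤ 10)) := by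
    apply List.countP_congr
    intro k hk
    rw [List.mem_range'_1] at hk
    have hk' : k < xs.length := by omega
    have h1 := hlo_ge k hk' (by omega)
    have h2 := hhi_lt k hk' (by omega)
    rw [hxsk k hk'] at h1 h2
    simp only [pvNear, Bool.and_eq_true, decide_eq_true_eq]
    rw [abs_sub_comm (cs.getD k (0,0)).2 c.2]
    constructor
    · rintro ⟨-, hy⟩; exact hy
    · intro hy
      refine ⟨?_, hy⟩
      rw [abs_le]
      omega
  rw [hleft, hright, hmid]
  omega

-- A's per-element existential (some OTHER index near) equals '2 ≤ count of near centers'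
theorem cond_eq (bboxes : List (Int × Int × Int × Int)) (k : Nat) (hk : k < bboxes.length) :
    pvAInner (pvCenter bboxes[k]) ((k : Int)) (PySem.List.enumerate bboxes 0) =
      decide (2 ≤ (bboxes.map pvCenter).countP (fun c2 => pvNear (pvCenter bboxes[k]) c2)) := by
  set c := pvCenter bboxes[k] with hc
  set en := PySem.List.enumerate bboxes 0 with hen
  set g : (Int × (Int × Int × Int × Int)) → Bool := fun p => pvNear c (pvCenter p.2) with hg
  set e0 : Int × (Int × Int × Int × Int) := ((k : Int), bboxes[k]) with he0
  have he0mem : e0 ∈ en := by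
    rw [hen, PySem.List.mem_enumerate_iff]
    exact ⟨k, hk, by simp [he0]⟩
  have hpw : en.Pairwise (fun p q => p.1 < q.1) := by
    rw [hen]; exact PySem.List.pairwise_lt_enumerate bboxes 0
  have hnd : en.Nodup := hpw.imp (fun {a b} h => by intro hab; rw [hab] at h; omega)
  have hmapnd : (en.map (fun p => p.1)).Nodup :=
    (List.pairwise_map.mpr hpw).imp (fun {a b} h => by omega)
  have hg0 : g e0 = true := by
    simp only [hg, he0]
    exact pvNear_refl c
  have hperm : en.Perm (e0 :: en.erase e0) := List.perm_cons_erase he0mem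
  have hcent : (bboxes.map pvCenter).countP (fun c2 => pvNear c c2) = en.countP g := by
    conv_lhs => rw [← PySem.List.map_snd_enumerate bboxes 0, ← hen, List.map_map, List.countP_map]
    rfl
  have hcount : en.countP g = (en.erase e0).countP g + 1 := by
    rw [hperm.countP_eq, List.countP_cons, hg0]
    simp
  have hfst : ∀ p ∈ en.erase e0, (k : Int) ≠ p.1 := by
    intro p hp heq
    have hmem := (List.Nodup.mem_erase_iff hnd).mp hp
    exact hmem.1 (List.inj_on_of_nodup_map hmapnd hmem.2 he0mem (by simp [he0, ← heq]))
  rw [pvAInner_eq_any, Bool.eq_iff_iff, hperm.any_eq]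
  simp only [List.any_cons, Bool.or_eq_true, List.any_eq_true, Bool.and_eq_true,
    decide_eq_true_eq]
  constructor
  · rintro (⟨hne, -⟩ | ⟨p, hp, hpne, hgp⟩)
    · exact absurd (by rw [he0] : (k:Int) = e0.1) hne
    · rw [hcent, hcount]
      have hne0 : (en.erase e0).countP g ≠ 0 := by
        intro h0
        rw [List.countP_eq_zero] at h0
        exact absurd hgp (by simpa using h0 p hp)
      omega
  · intro hge
    rw [hcent, hcount] at hge
    have hne0 : (en.erase e0).countP g ≠ 0 := by omega
    have hex : ¬ ∀ a ∈ en.erase e0, ¬ g a = true := fun hall => hne0 (List.countP_eq_zero.mpr hall)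
    push_neg at hex
    obtain ⟨p, hp, hgp⟩ := hex
    exact Or.inr ⟨p, hp, hfst p hp, hgp⟩

-- the two output loops stay synchronised when the per-element conditions agree
theorem loop_sync (bs0 : List (Int × Int × Int × Int)) (cs : List (Int × Int)) (xs : List Int)
    (l : List (Int × Int × Int × Int)) (s : Int)
    (H : ∀ p ∈ PySem.List.enumerate l s,
      pvAInner (pvCenter p.2) p.1 (PySem.List.enumerate bs0 0) =
        decide (2 ≤ pvCountNear cs xs (pvCenter p.2))) :
    pvAOuter bs0 (PySem.List.enumerate l s) = pvBLoop cs xs (l.zip (l.map pvCenter)) := by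
  induction l generalizing s with
  | nil => rfl
  | cons x tl ih =>
    rw [PySem.List.enumerate_cons] at H ⊢
    have hx := H (s, x) (List.mem_cons_self)
    simp only [List.map_cons, List.zip_cons_cons, pvAOuter, pvBLoop, hx]
    have htl := ih (s + 1) (fun p hp => H p (List.mem_cons_of_mem _ hp))
    by_cases hcond : 2 ≤ pvCountNear cs xs (pvCenter x) <;> simp [hcond, htl]

-- ===== VERDICT (by name: the statement is the Claim_ definition above) =====
theorem seleccionar_cajas_cercanas_spec : Claim_equal_seleccionar_cajas_cercanas := by
  intro bboxes _
  show _ = seleccionar_cajas_cercanas_alt bboxes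
  unfold seleccionar_cajas_cercanas seleccionar_cajas_cercanas_alt
  simp only []
  apply loop_sync
  intro p hp
  rw [PySem.List.mem_enumerate_iff] at hp
  obtain ⟨k, hk, hpk⟩ := hp
  subst hpk
  simp only [Int.zero_add]
  rw [cond_eq bboxes k hk]
  congr 1
  have hperm : (PySem.List.sorted (bboxes.map pvCenter) (fun c => c.1) false).Perm (bboxes.map pvCenter) :=
    PySem.List.sorted_perm _ _ _
  rw [(hperm.countP_eq _).symm,
    ← count_window _ _ (PySem.List.sorted_map_key_pairwise (bboxes.map pvCenter) (fun c => c.1))]
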